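-- pv_equiv track=rewrite | github.com/pypi-data/pypi-mirror-381 | packages/mcp-server-things/mcp_server_things-1.3.2.tar.gz/mcp_server_things-1.3.2/src/things_mcp/services/applescript/formatters.py | split_applescript_output
-- ===== SOURCE A (Python) =====
-- from typing import Any, Dict, List, Optional
--
-- def split_applescript_output(output: str) -> List[str]:
--     """Split AppleScript output by commas, handling quoted strings and braces properly."""
--     parts = []
--     current_part = ""
--     in_quotes = False
--     brace_depth = 0
--
--     for char in output:
--         if char == '"':
--             in_quotes = not in_quotes
--             current_part += char
--         elif char == '{' and not in_quotes:
--             brace_depth += 1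
--             current_part += char
--         elif char == '}' and not in_quotes:
--             brace_depth -= 1
--             current_part += char
--         elif char == ',' and not in_quotes and brace_depth == 0:
--             parts.append(current_part)
--             current_part = ""
--         else:
--             current_part += char
--
--     # Add the last part
--     if current_part:
--         parts.append(current_part)
--
--     return parts
-- ===== SOURCE B (Python) =====
-- from typing import List, Optional
--
--
-- def _find_top_level_comma(s: str) -> Optional[int]:
--     """Index of the first comma outside quotes and braces, or None."""
--     in_quotes = False
--     depth = 0
--     for i, ch in enumerate(s):
--         if ch == '"':
--             in_quotes = not in_quotes
--         elif ch == '{' and not in_quotes: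
--             depth += 1
--         elif ch == '}' and not in_quotes:
--             depth -= 1
--         elif ch == ',' and not in_quotes and depth == 0:
--             return i
--     return None
--
--
-- def split_applescript_output(output: str) -> List[str]:
--     """Split AppleScript output by commas, handling quoted strings and braces properly."""
--     parts = []
--     rest = output
--     while True:
--         cut = _find_top_level_comma(rest)
--         if cut is None:
--             if rest:
--                 parts.append(rest)
--             return parts
--         parts.append(rest[:cut])
--         rest = rest[cut + 1:]
-- ===== Notes on version B (the rewrite author's own statement) =====
-- stated objective: alternative
-- what changed: A builds the parts during a single character scan with a current-part accumulator; B repeatedly finds the index of the next top-level comma with a stateless helper and slices the string between cuts, appending the final remainder only if nonempty.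
import Mathlib
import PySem

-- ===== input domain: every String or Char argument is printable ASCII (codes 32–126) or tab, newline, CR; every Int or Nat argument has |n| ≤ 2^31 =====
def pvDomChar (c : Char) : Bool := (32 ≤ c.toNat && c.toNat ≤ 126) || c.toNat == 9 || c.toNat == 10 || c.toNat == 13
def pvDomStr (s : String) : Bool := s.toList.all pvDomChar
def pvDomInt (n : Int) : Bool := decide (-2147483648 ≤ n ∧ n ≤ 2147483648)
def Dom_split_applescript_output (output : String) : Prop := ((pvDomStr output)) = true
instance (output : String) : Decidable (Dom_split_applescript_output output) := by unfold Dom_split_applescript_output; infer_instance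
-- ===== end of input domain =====

-- B replaces A's single accumulator scan by a find-next-delimiter-then-slice loop: same values, different decomposition (objective: alternative).

-- ===== PORT A =====
-- A's for-loop over the characters; state (parts, current_part, in_quotes, brace_depth).
def pvLoopA : List Char → List (List Char) → List Char → Bool → Int → (List (List Char) × List Char)
  | [], parts, cur, _, _ => (parts, cur)
  | c :: cs, parts, cur, q, d =>
    if c = '"' then pvLoopA cs parts (cur ++ [c]) (!q) d
    else if c = '{' ∧ ¬(q = true) then pvLoopA cs parts (cur ++ [c]) q (d + 1)
    else if c = '}' ∧ ¬(q = true) then pvLoopA cs parts (cur ++ [c]) q (d - 1)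
    else if c = ',' ∧ ¬(q = true) ∧ d = 0 then pvLoopA cs (parts ++ [cur]) [] q d
    else pvLoopA cs parts (cur ++ [c]) q d

def split_applescript_output (output : String) : List String :=
  let r := pvLoopA output.toList [] [] false 0
  let parts := if r.2 ≠ [] then r.1 ++ [r.2] else r.1
  parts.map String.ofList

-- ===== PORT B =====
-- B's helper _find_top_level_comma: enumerate with fresh (in_quotes, depth) state.
def pvFindCut : List Char → Bool → Int → Nat → Option Nat
  | [], _, _, _ => none
  | c :: cs, q, d, i =>
    if c = '"' then pvFindCut cs (!q) d (i + 1)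
    else if c = '{' ∧ ¬(q = true) then pvFindCut cs q (d + 1) (i + 1)
    else if c = '}' ∧ ¬(q = true) then pvFindCut cs q (d - 1) (i + 1)
    else if c = ',' ∧ ¬(q = true) ∧ d = 0 then some i
    else pvFindCut cs q d (i + 1)

theorem pvFindCut_ne_nil {s : List Char} {q : Bool} {d : Int} {i j : Nat}
    (h : pvFindCut s q d i = some j) : s ≠ [] := by
  cases s <;> simp [pvFindCut] at h ⊢

-- B's while loop: find the next top-level comma in `rest`, slice, continue on the tail.
def pvGoB (s : List Char) : List (List Char) :=
  match h : pvFindCut s false 0 0 with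
  | none => if s = [] then [] else [s]
  | some i => s.take i :: pvGoB (s.drop (i + 1))
termination_by s.length
decreasing_by
  have hs : s ≠ [] := pvFindCut_ne_nil h
  have : 0 < s.length := List.length_pos_iff.mpr hs
  simp [List.length_drop]; omega

def split_applescript_output_alt (output : String) : List String :=
  (pvGoB output.toList).map String.ofList

-- ===== PRECONDITION & SPEC =====
def Spec_split_applescript_output (output : String) (out : List String) : Prop := out = split_applescript_output_alt output
instance (output : String) (out : List String) : Decidable (Spec_split_applescript_output output out) := by unfold Spec_split_applescript_output; infer_instance

-- ===== CLAIM (what is proved, stated in full; the proofs are below) =====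
def Claim_equal_split_applescript_output : Prop := ∀ (output : String), Dom_split_applescript_output output → Spec_split_applescript_output output (split_applescript_output output)

-- ===== LEMMAS AND PROOFS =====

theorem pvGoB_none {s : List Char} (h : pvFindCut s false 0 0 = none) :
    pvGoB s = if s = [] then [] else [s] := by
  rw [pvGoB]; split <;> simp_all

theorem pvGoB_some {s : List Char} {i : Nat} (h : pvFindCut s false 0 0 = some i) :
    pvGoB s = s.take i :: pvGoB (s.drop (i + 1)) := by
  rw [pvGoB]; split <;> simp_all

theorem pvLoopA_nil (parts : List (List Char)) (cur : List Char) (q : Bool) (d : Int) :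
    pvLoopA [] parts cur q d = (parts, cur) := rfl

theorem pvLoopA_cons (c : Char) (cs : List Char) (parts : List (List Char)) (cur : List Char)
    (q : Bool) (d : Int) :
    pvLoopA (c :: cs) parts cur q d =
      (if c = '"' then pvLoopA cs parts (cur ++ [c]) (!q) d
      else if c = '{' ∧ ¬(q = true) then pvLoopA cs parts (cur ++ [c]) q (d + 1)
      else if c = '}' ∧ ¬(q = true) then pvLoopA cs parts (cur ++ [c]) q (d - 1)
      else if c = ',' ∧ ¬(q = true) ∧ d = 0 then pvLoopA cs (parts ++ [cur]) [] q d
      else pvLoopA cs parts (cur ++ [c]) q d) := rfl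

-- counter-free version of pvFindCut, for the inductions
def pvFc : List Char → Bool → Int → Option Nat
  | [], _, _ => none
  | c :: cs, q, d =>
    if c = '"' then (pvFc cs (!q) d).map Nat.succ
    else if c = '{' ∧ ¬(q = true) then (pvFc cs q (d + 1)).map Nat.succ
    else if c = '}' ∧ ¬(q = true) then (pvFc cs q (d - 1)).map Nat.succ
    else if c = ',' ∧ ¬(q = true) ∧ d = 0 then some 0
    else (pvFc cs q d).map Nat.succ

theorem pvMapShift (o : Option Nat) (i : Nat) :
    Option.map (fun k => (i + 1) + k) o = Option.map (fun k => i + k) (Option.map Nat.succ o) := by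
  cases o with
  | none => rfl
  | some a => simp [Nat.succ_eq_add_one]; omega

theorem pvFindCut_eq (s : List Char) (q : Bool) (d : Int) (i : Nat) :
    pvFindCut s q d i = (pvFc s q d).map (fun k => i + k) := by
  induction s generalizing q d i with
  | nil => simp [pvFindCut, pvFc]
  | cons c cs ih =>
    unfold pvFindCut pvFc
    split_ifs <;> first
      | (rw [ih]; exact pvMapShift _ i)
      | simp

theorem pvLoopA_nocut {s : List Char} {q : Bool} {d : Int}
    (h : pvFc s q d = none) (parts : List (List Char)) (cur : List Char) :
    pvLoopA s parts cur q d = (parts, cur ++ s) := by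
  induction s generalizing q d cur with
  | nil => simp [pvLoopA_nil]
  | cons c cs ih =>
    unfold pvFc at h
    rw [pvLoopA_cons]
    split_ifs at h ⊢ <;> (rw [Option.map_eq_none_iff] at h; rw [ih h]; simp)

theorem pvLoopA_cut {s : List Char} {q : Bool} {d : Int} {i : Nat}
    (h : pvFc s q d = some i) (parts : List (List Char)) (cur : List Char) :
    pvLoopA s parts cur q d
      = pvLoopA (s.drop (i + 1)) (parts ++ [cur ++ s.take i]) [] false 0 := by
  induction s generalizing q d i parts cur with
  | nil => simp [pvFc] at h
  | cons c cs ih =>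
    unfold pvFc at h
    rw [pvLoopA_cons]
    split_ifs at h ⊢ with h1 h2 h3 h4
    · obtain ⟨k, hk, rfl⟩ := Option.map_eq_some_iff.mp h
      rw [ih hk]; simp
    · obtain ⟨k, hk, rfl⟩ := Option.map_eq_some_iff.mp h
      rw [ih hk]; simp
    · obtain ⟨k, hk, rfl⟩ := Option.map_eq_some_iff.mp h
      rw [ih hk]; simp
    · -- comma branch: here q = false, d = 0, i = 0
      obtain ⟨-, hq, hd⟩ := h4
      cases h
      simp only [Bool.not_eq_true] at hq
      subst hq; subst hd
      simp
    · obtain ⟨k, hk, rfl⟩ := Option.map_eq_some_iff.mp h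
      rw [ih hk]; simp

-- how a pending current_part is glued onto the front of the remaining segments
def pvGlue (cur : List Char) : List (List Char) → List (List Char)
  | [] => if cur = [] then [] else [cur]
  | h :: t => (cur ++ h) :: t

theorem pvGlue_nil (xs : List (List Char)) : pvGlue [] xs = xs := by
  cases xs <;> simp [pvGlue]

def pvFinishA (r : List (List Char) × List Char) : List (List Char) :=
  if r.2 ≠ [] then r.1 ++ [r.2] else r.1

theorem pvMain (s : List Char) :
    ∀ parts cur, pvFinishA (pvLoopA s parts cur false 0) = parts ++ pvGlue cur (pvGoB s) := by
  induction s using pvGoB.induct with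
  | case1 h =>
    intro parts cur
    have hfc : pvFc [] false 0 = none := rfl
    rw [pvLoopA_nocut hfc, pvGoB_none h]
    simp [pvFinishA, pvGlue]
    split_ifs <;> simp
  | case2 s h hs =>
    intro parts cur
    rw [pvFindCut_eq] at h
    rw [Option.map_eq_none_iff] at h
    rw [pvLoopA_nocut h, pvGoB_none]
    · simp [hs, pvFinishA, pvGlue]
    · rw [pvFindCut_eq, h]; rfl
  | case3 s i h ih =>
    intro parts cur
    have hfc : pvFc s false 0 = some i := by
      rw [pvFindCut_eq] at h
      obtain ⟨k, hk, hik⟩ := Option.map_eq_some_iff.mp h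
      have : k = i := by omega
      rwa [this] at hk
    rw [pvLoopA_cut hfc, ih, pvGoB_some h, pvGlue_nil]
    simp [pvGlue]

-- ===== VERDICT (by name: the statement is the Claim_ definition above) =====
theorem split_applescript_output_spec : Claim_equal_split_applescript_output := by
  intro output _
  unfold Spec_split_applescript_output split_applescript_output split_applescript_output_alt
  have := pvMain output.toList [] []
  simp only [pvGlue_nil, List.nil_append] at this
  simp [pvFinishA] at this
  simp [this]
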